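-- pv_equiv track=rewrite | github.com/bmaisonn/advent_of_code_2019 | fuel_need.py | compute_fuel_for_fuel
-- ===== SOURCE A (Python) =====
-- def compute_fuel_amount(mass):
--     return (mass//3) - 2
--
-- def compute_fuel_for_fuel(mass):
--     fuel_need_for_fuel = 0
--     tmp = mass
--
--     while True:
--         fuel_for_fuel = compute_fuel_amount(tmp)
--         if fuel_for_fuel <= 0:
--             break
--         fuel_need_for_fuel += fuel_for_fuel
--         tmp = fuel_for_fuel
--
--     return fuel_need_for_fuel
-- ===== SOURCE B (Python) =====
-- def compute_fuel_amount(mass):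
--     return (mass//3) - 2
--
-- def compute_fuel_for_fuel(mass):
--     x = compute_fuel_amount(mass)
--     if x <= 0:
--         return 0
--     return x + compute_fuel_for_fuel(x)
-- ===== Notes on version B (the rewrite author's own statement) =====
-- stated objective: simpler
-- what changed: Replaces the while-loop with an explicit accumulator by a direct recursion on the shrinking fuel mass, the recursion's unwinding doing the summation.
import Mathlib
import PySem

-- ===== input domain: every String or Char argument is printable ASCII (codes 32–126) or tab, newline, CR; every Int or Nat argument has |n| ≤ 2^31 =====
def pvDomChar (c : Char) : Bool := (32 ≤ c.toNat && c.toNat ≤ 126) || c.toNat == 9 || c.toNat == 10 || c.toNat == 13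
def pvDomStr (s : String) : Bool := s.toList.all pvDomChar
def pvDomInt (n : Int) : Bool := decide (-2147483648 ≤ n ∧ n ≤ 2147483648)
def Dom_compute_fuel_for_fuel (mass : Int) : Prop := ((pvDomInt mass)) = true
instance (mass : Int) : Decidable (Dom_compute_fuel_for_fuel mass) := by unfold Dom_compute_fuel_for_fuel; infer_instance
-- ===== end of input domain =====

-- B rewrites the while-loop-with-accumulator as a direct recursion on the shrinking fuel mass (return value only; same results).
-- ===== PORT A =====
def compute_fuel_amount (mass : Int) : Int := PySem.Int.floordiv mass 3 - 2

-- a step of the while loop shrinks tmp (when it continues, tmp ≥ 9 > fuel > 0)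
theorem pvFuelStep_lt (tmp : Int) (h : ¬ compute_fuel_amount tmp ≤ 0) :
    (compute_fuel_amount tmp).toNat < tmp.toNat := by
  simp only [compute_fuel_amount, PySem.Int.floordiv_eq_ediv_of_pos (by omega : (0:Int) < 3)] at *
  omega

-- the 'while True' loop of A, state = (fuel_need_for_fuel, tmp)
def fuelLoopA (acc tmp : Int) : Int :=
  let fuel_for_fuel := compute_fuel_amount tmp
  if h : fuel_for_fuel ≤ 0 then acc
  else fuelLoopA (acc + fuel_for_fuel) fuel_for_fuel
termination_by tmp.toNat
decreasing_by exact pvFuelStep_lt tmp h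

def compute_fuel_for_fuel (mass : Int) : Int := fuelLoopA 0 mass

-- ===== PORT B =====
def compute_fuel_for_fuel_alt (mass : Int) : Int :=
  let x := compute_fuel_amount mass
  if h : x ≤ 0 then 0
  else x + compute_fuel_for_fuel_alt x
termination_by mass.toNat
decreasing_by exact pvFuelStep_lt mass h

-- ===== PRECONDITION & SPEC =====
def Spec_compute_fuel_for_fuel (mass : Int) (out : Int) : Prop := out = compute_fuel_for_fuel_alt mass
instance (mass : Int) (out : Int) : Decidable (Spec_compute_fuel_for_fuel mass out) := by unfold Spec_compute_fuel_for_fuel; infer_instance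

-- ===== CLAIM (what is proved, stated in full; the proofs are below) =====
def Claim_equal_compute_fuel_for_fuel : Prop := ∀ (mass : Int), Dom_compute_fuel_for_fuel mass → Spec_compute_fuel_for_fuel mass (compute_fuel_for_fuel mass)

-- ===== LEMMAS AND PROOFS =====

-- ===== VERDICT (by name: the statement is the Claim_ definition above) =====
theorem pvLoop_eq_alt (tmp acc : Int) : fuelLoopA acc tmp = acc + compute_fuel_for_fuel_alt tmp := by
  rw [fuelLoopA, compute_fuel_for_fuel_alt]
  split
  · simp
  · rw [pvLoop_eq_alt]; ring
termination_by tmp.toNat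
decreasing_by exact pvFuelStep_lt tmp (by assumption)

theorem compute_fuel_for_fuel_spec : Claim_equal_compute_fuel_for_fuel := by
  intro mass _
  show compute_fuel_for_fuel mass = compute_fuel_for_fuel_alt mass
  rw [compute_fuel_for_fuel, pvLoop_eq_alt, zero_add]
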